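-- pv_equiv track=rewrite | github.com/realfinder/AvsP-macros | Open Image Sequence.py | GetFirstAlpha
-- ===== SOURCE A (Python) =====
-- def GetFirstAlpha(f):
--     a = ''
--     for n in f:
--         if not n.isdigit():
--             a = ''.join([a,n])
--         else:
--             break
--     return a
-- ===== SOURCE B (Python) =====
-- def GetFirstAlpha(f):
--     idx = next((i for i, c in enumerate(f) if c.isdigit()), len(f))
--     return f[:idx]
-- ===== Notes on version B (the rewrite author's own statement) =====
-- stated objective: faster
-- what changed: B locates the first digit's index in one enumerate pass and returns a single slice f[:idx], instead of rebuilding the accumulated prefix with a join on every character.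
import Mathlib
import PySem

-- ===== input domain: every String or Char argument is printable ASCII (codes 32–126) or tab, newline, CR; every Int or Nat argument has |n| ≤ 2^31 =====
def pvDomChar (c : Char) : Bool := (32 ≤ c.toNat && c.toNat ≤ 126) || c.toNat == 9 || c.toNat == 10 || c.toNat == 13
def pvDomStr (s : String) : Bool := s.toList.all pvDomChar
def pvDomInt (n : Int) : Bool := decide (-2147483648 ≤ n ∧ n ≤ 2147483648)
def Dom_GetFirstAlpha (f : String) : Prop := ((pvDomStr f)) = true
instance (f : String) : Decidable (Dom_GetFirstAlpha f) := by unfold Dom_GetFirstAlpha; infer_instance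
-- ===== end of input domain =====

-- B finds the first digit's index and takes one slice instead of accumulating the prefix char by char.

-- ===== PORT A =====
def GetFirstAlphaGo (a : List Char) (l : List Char) : List Char :=
  match l with
  | [] => a
  | n :: rest =>
      if ¬ PySem.Chars.isdigit n then GetFirstAlphaGo (a ++ [n]) rest
      else a

def GetFirstAlpha (f : String) : String := String.ofList (GetFirstAlphaGo [] f.toList)

-- ===== PORT B =====
-- next((i for i, c in enumerate(f) if c.isdigit()), len(f))
def firstDigitIdx : List Char → Nat
  | [] => 0
  | c :: rest => if PySem.Chars.isdigit c then 0 else 1 + firstDigitIdx rest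

def GetFirstAlpha_alt (f : String) : String :=
  String.ofList (PySem.List.slice f.toList none (some ((firstDigitIdx f.toList : Nat) : Int)))

-- ===== PRECONDITION & SPEC =====
def Spec_GetFirstAlpha (f : String) (out : String) : Prop := out = GetFirstAlpha_alt f
instance (f : String) (out : String) : Decidable (Spec_GetFirstAlpha f out) := by unfold Spec_GetFirstAlpha; infer_instance

-- ===== CLAIM (what is proved, stated in full; the proofs are below) =====
def Claim_equal_GetFirstAlpha : Prop := ∀ (f : String), Dom_GetFirstAlpha f → Spec_GetFirstAlpha f (GetFirstAlpha f)

-- ===== LEMMAS AND PROOFS =====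
theorem go_eq_takeWhile (l : List Char) (a : List Char) :
    GetFirstAlphaGo a l = a ++ l.takeWhile (fun c => !PySem.Chars.isdigit c) := by
  induction l generalizing a with
  | nil => simp [GetFirstAlphaGo]
  | cons n rest ih =>
    simp only [GetFirstAlphaGo, List.takeWhile]
    by_cases h : PySem.Chars.isdigit n
    · simp [h]
    · simp [h, ih]

theorem take_firstDigitIdx (l : List Char) :
    l.take (firstDigitIdx l) = l.takeWhile (fun c => !PySem.Chars.isdigit c) := by
  induction l with
  | nil => simp [firstDigitIdx]
  | cons c rest ih =>
    simp only [firstDigitIdx, List.takeWhile]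
    by_cases h : PySem.Chars.isdigit c
    · simp [h]
    · simp [h, Nat.add_comm 1, ih]

-- ===== VERDICT (by name: the statement is the Claim_ definition above) =====
theorem GetFirstAlpha_spec : Claim_equal_GetFirstAlpha := by
  intro f _
  unfold Spec_GetFirstAlpha GetFirstAlpha GetFirstAlpha_alt
  rw [PySem.List.slice_to_natCast, take_firstDigitIdx, go_eq_takeWhile]
  simp
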